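-- pv_equiv track=rewrite | github.com/kennycaiguo/kenny-python-in-progress | python-in-progress-code/练习，检索会员邮箱.py | get_members2
-- ===== SOURCE A (Python) =====
-- def get_members2(info):
--     mail_addr = info.split(',')
--     member = {}
--     for m in mail_addr:
--         mail = m.split('@')
--         user = mail[0]
--         domain = mail[1]
--         u = member.get(domain, [])  # 刚开始字典是空的，没有数据,注意这里的意思，如果字典有值就返回该值，如果没有就返回[],
--         if len(u) == 0:  # 长度==0 说明没有这个key，需要添加这个key
--             u.append(user)
--             member[domain] = u
--         else:  # 有key，直接将用户添加到key对应列表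
--             u.append(user)
--
--     return member
-- ===== SOURCE B (Python) =====
-- def get_members2(info):
--     # Two-pass grouping: list the split entries once, dedup the domains in
--     # first-occurrence order, then collect each domain's users by a filter pass.
--     pairs = [m.split('@') for m in info.split(',')]
--     domains = dict.fromkeys(p[1] for p in pairs)
--     return {d: [p[0] for p in pairs if p[1] == d] for d in domains}
-- ===== Notes on version B (the rewrite author's own statement) =====
-- stated objective: alternative
-- what changed: Replaces A's incremental dict-bucketing loop (get/append/insert per element) with a two-pass scheme: dedup the domains in first-occurrence order, then build each domain's user list by a filter pass over the split entries.
import Mathlib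
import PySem

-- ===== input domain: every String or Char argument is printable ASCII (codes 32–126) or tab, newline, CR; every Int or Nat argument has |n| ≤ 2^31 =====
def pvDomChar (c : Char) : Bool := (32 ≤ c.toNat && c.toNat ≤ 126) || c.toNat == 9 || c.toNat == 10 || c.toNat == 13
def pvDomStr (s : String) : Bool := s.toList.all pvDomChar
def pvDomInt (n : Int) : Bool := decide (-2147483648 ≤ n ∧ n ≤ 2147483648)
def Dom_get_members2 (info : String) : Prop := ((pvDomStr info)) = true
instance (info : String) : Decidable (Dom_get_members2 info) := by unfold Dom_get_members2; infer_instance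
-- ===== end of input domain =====

-- B groups by a dedup-of-domains pass followed by per-domain filter passes instead of
-- A's incremental dict-bucketing loop; same results, no speed claim.

-- s.split(sep) for a nonempty literal sep: Str.split? is none only for sep = ""
def pySplit (s sep : String) : List String := (PySem.Str.split? s sep).getD []

-- ===== PORT A =====
def get_members2 (info : String) : List (String × List String) :=
  let mail_addr := pySplit info ","
  (mail_addr.foldl (fun member m =>
    let mail := pySplit m "@"
    let user := (PySem.List.pyGet? mail 0).getD ""      -- none excluded by Pre_
    let domain := (PySem.List.pyGet? mail 1).getD ""    -- none excluded by Pre_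
    let u := member.getD domain []
    if u.length == 0 then
      member.insert domain (u ++ [user])
    else
      -- Python mutates the aliased list in place; modelled as updating the value at its key
      member.modify domain [] (fun v => v ++ [user])) PySem.Dict.empty).items

-- ===== PORT B =====
def get_members2_alt (info : String) : List (String × List String) :=
  let pairs := (pySplit info ",").map (fun m => pySplit m "@")
  let domains := PySem.List.dedup (pairs.map (fun p => (PySem.List.pyGet? p 1).getD ""))
  domains.map (fun d =>
    (d, (pairs.filter (fun p => (PySem.List.pyGet? p 1).getD "" == d)).map
          (fun p => (PySem.List.pyGet? p 0).getD "")))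

-- ===== PRECONDITION & SPEC =====
-- Pre_ excludes exactly the inputs where A raises IndexError: a comma-separated entry that does not split into at least two pieces at the at-sign.
def Pre_get_members2 (info : String) : Prop :=
  ∀ m ∈ pySplit info ",", 2 ≤ (pySplit m "@").length
instance (info : String) : Decidable (Pre_get_members2 info) := by unfold Pre_get_members2; infer_instance

def pvWitness_get_members2 : String := "alice@x.com,bob@y.com,carl@x.com"

def Spec_get_members2 (info : String) (out : List (String × List String)) : Prop := out = get_members2_alt info
instance (info : String) (out : List (String × List String)) : Decidable (Spec_get_members2 info out) := by unfold Spec_get_members2; infer_instance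

-- ===== CLAIM (what is proved, stated in full; the proofs are below) =====
def Claim_equal_get_members2 : Prop := ∀ (info : String), Dom_get_members2 info → Pre_get_members2 info → Spec_get_members2 info (get_members2 info)

-- ===== LEMMAS AND PROOFS =====

-- A's branching step is exactly "append user to the bucket at domain, in place".
theorem stepA_eq_modify (d : PySem.Dict String (List String)) (domain user : String) :
    (let u := d.getD domain []
     if u.length == 0 then d.insert domain (u ++ [user])
     else d.modify domain [] (fun v => v ++ [user]))
    = d.modify domain [] (fun v => v ++ [user]) := by
  simp only [PySem.Dict.modify]
  by_cases h : (d.getD domain []).length = 0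
  · have : d.getD domain [] = [] := List.eq_nil_of_length_eq_zero h
    simp [this]
  · simp [h]

theorem get_members2_eq (info : String) :
    get_members2 info =
      ((((pySplit info ",").map (fun m => pySplit m "@")).map
          (fun p => ((PySem.List.pyGet? p 1).getD "", (PySem.List.pyGet? p 0).getD ""))).foldl
        (fun d q => d.modify q.1 [] (fun v => v ++ [q.2])) PySem.Dict.empty).items := by
  unfold get_members2
  rw [List.map_map, List.foldl_map]
  refine congrArg PySem.Dict.items ?_
  congr 1
  funext d m
  exact stepA_eq_modify d _ _

theorem get_members2_spec' (info : String) :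
    get_members2 info = get_members2_alt info := by
  rw [get_members2_eq]
  unfold get_members2_alt
  set ps := (pySplit info ",").map (fun m => pySplit m "@") with hps
  set l := ps.map (fun p => ((PySem.List.pyGet? p 1).getD "", (PySem.List.pyGet? p 0).getD "")) with hl
  set D := l.foldl (fun d q => d.modify q.1 [] (fun v => v ++ [q.2])) PySem.Dict.empty with hD
  have hnd : D.keys.Nodup := by
    rw [hD]
    exact PySem.Dict.nodup_keys_foldl_modify_key l (fun q => q.1) [] (fun _ q v => v ++ [q.2])
      PySem.Dict.empty PySem.Dict.nodup_keys_empty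
  have hkeys : D.keys = PySem.List.dedup (ps.map (fun p => (PySem.List.pyGet? p 1).getD "")) := by
    rw [hD, PySem.Dict.keys_foldl_modify_key]
    simp [hl, List.map_map, Function.comp_def, PySem.Set.update_nil_left]
  rw [PySem.Dict.items_eq_map_keys D hnd [], hkeys]
  apply List.map_congr_left
  intro k _
  have hval : D.getD k [] = (l.filter (fun q => q.1 == k)).map (fun q => q.2) := by
    rw [hD, PySem.Dict.getD_foldl_modify_append]
    simp
  rw [hval, hl, List.filter_map, List.map_map]
  simp [Function.comp_def]

-- ===== VERDICT (by name: the statement is the Claim_ definition above) =====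
theorem get_members2_spec : Claim_equal_get_members2 := by
  intro info _ _
  exact get_members2_spec' info
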